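-- pv_equiv track=rewrite | github.com/vumaiha/subregular_learning | string-to-fo.py | zip_nestedlst_lst
-- ===== SOURCE A (Python) =====
-- def zip_nestedlst_lst(lst_of_lst,lst):
-- 	size = sum(len(sublst) for sublst in lst_of_lst)
-- 	j = 0
-- 	while j!=size:
-- 		for l in lst_of_lst:
-- 			for i in range(len(l)):
-- 				l[i]=lst[j]
-- 				j += 1
-- 	return lst_of_lst
-- ===== SOURCE B (Python) =====
-- def zip_nestedlst_lst(lst_of_lst, lst):
--     off = 0
--     for l in lst_of_lst:
--         n = len(l)
--         l[:] = lst[off:off + n]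
--         off += n
--     return lst_of_lst
-- ===== Notes on version B (the rewrite author's own statement) =====
-- stated objective: alternative
-- what changed: Replaces the while/nested per-element assignment loops with a single pass that copies each sublist's chunk by one slice assignment at a running offset.
import Mathlib
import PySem

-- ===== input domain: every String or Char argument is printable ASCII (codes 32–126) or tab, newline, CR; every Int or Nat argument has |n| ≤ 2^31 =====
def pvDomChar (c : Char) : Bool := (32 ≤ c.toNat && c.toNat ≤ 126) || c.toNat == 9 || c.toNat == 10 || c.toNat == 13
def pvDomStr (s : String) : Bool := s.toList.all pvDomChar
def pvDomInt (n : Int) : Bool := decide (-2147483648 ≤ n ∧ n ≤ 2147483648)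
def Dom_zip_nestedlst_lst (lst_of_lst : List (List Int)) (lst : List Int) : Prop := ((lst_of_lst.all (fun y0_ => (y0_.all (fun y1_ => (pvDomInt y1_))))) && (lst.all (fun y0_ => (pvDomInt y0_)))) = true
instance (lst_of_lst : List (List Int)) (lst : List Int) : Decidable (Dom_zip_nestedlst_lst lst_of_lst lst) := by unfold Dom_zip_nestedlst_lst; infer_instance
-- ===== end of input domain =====

-- B replaces A's while/nested per-element index loops by one pass copying each sublist's chunk
-- with a slice at a running offset (objective: alternative decomposition, same cost).
-- A mutates the sublists of lst_of_lst in place; the equivalence proved here is about the return value.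

-- ===== PORT A =====
-- inner loop: for i in range(len(l)): l[i] = lst[j]; j += 1   (state: current list, j)
def zipA_fill (lst : List Int) (l : List Int) (j : Int) : List Int × Int :=
  (PySem.List.pyRange 0 (l.length : Int) 1).foldl
    (fun (st : List Int × Int) i =>
      (PySem.List.pySetD st.1 i (PySem.List.pyGetD lst st.2 0), st.2 + 1))
    (l, j)

-- while j != size: the body adds size to j each pass, so it runs exactly once iff size ≠ 0.
def zip_nestedlst_lst (lst_of_lst : List (List Int)) (lst : List Int) : List (List Int) :=
  let size : Int := (lst_of_lst.map (fun sublst => (sublst.length : Int))).sum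
  if size = 0 then lst_of_lst
  else
    (lst_of_lst.foldl
      (fun (st : List (List Int) × Int) l =>
        let r := zipA_fill lst l st.2
        (st.1 ++ [r.1], r.2))
      ([], 0)).1

-- ===== PORT B =====
-- one pass: l[:] = lst[off:off+len(l)], off += len(l)
def zip_nestedlst_lst_alt (lst_of_lst : List (List Int)) (lst : List Int) : List (List Int) :=
  (lst_of_lst.foldl
    (fun (st : List (List Int) × Int) l =>
      (st.1 ++ [PySem.List.slice lst (some st.2) (some (st.2 + (l.length : Int)))],
       st.2 + (l.length : Int)))
    ([], 0)).1

-- ===== PRECONDITION & SPEC =====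
-- Pre_ excludes exactly the inputs where A raises IndexError: lst shorter than the summed sublist length.
def Pre_zip_nestedlst_lst (lst_of_lst : List (List Int)) (lst : List Int) : Prop :=
  (lst_of_lst.map (fun sublst => sublst.length)).sum ≤ lst.length
instance (lst_of_lst : List (List Int)) (lst : List Int) : Decidable (Pre_zip_nestedlst_lst lst_of_lst lst) := by unfold Pre_zip_nestedlst_lst; infer_instance

def pvWitness_zip_nestedlst_lst : List (List Int) × List Int := ([[0, 0], [], [0]], [1, 2, 3])

def Spec_zip_nestedlst_lst (lst_of_lst : List (List Int)) (lst : List Int) (out : List (List Int)) : Prop := out = zip_nestedlst_lst_alt lst_of_lst lst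
instance (lst_of_lst : List (List Int)) (lst : List Int) (out : List (List Int)) : Decidable (Spec_zip_nestedlst_lst lst_of_lst lst out) := by unfold Spec_zip_nestedlst_lst; infer_instance

-- ===== CLAIM (what is proved, stated in full; the proofs are below) =====
def Claim_equal_zip_nestedlst_lst : Prop := ∀ (lst_of_lst : List (List Int)) (lst : List Int), Dom_zip_nestedlst_lst lst_of_lst lst → Pre_zip_nestedlst_lst lst_of_lst lst → Spec_zip_nestedlst_lst lst_of_lst lst (zip_nestedlst_lst lst_of_lst lst)

-- ===== LEMMAS AND PROOFS =====

-- the chunk of lst of length n starting at j, as A reads it element by element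
def pvChunk (lst : List Int) (j : Int) (n : Nat) : List Int :=
  (PySem.List.pyRange 0 (n : Int) 1).map (fun i => PySem.List.pyGetD lst (j + i) 0)

lemma pvChunk_len (lst : List Int) (j : Int) (n : Nat) : (pvChunk lst j n).length = n := by
  simp [pvChunk, PySem.List.length_pyRange_one]

lemma pvChunk_succ (lst : List Int) (j : Int) (n : Nat) :
    pvChunk lst j (n + 1) = pvChunk lst j n ++ [PySem.List.pyGetD lst (j + n) 0] := by
  unfold pvChunk
  rw [show ((n + 1 : Nat) : Int) = (n : Int) + 1 by push_cast; ring,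
      PySem.List.pyRange_one_succ_right (by positivity), List.map_append]
  rfl

lemma fill_aux (lst : List Int) : ∀ (n : Nat) (cur : List Int) (j : Int), 0 ≤ j → n ≤ cur.length →
    (PySem.List.pyRange 0 (n : Int) 1).foldl
      (fun (st : List Int × Int) i =>
        (PySem.List.pySetD st.1 i (PySem.List.pyGetD lst st.2 0), st.2 + 1))
      (cur, j) = (pvChunk lst j n ++ cur.drop n, j + n) := by
  intro n
  induction n with
  | zero =>
    intro cur j hj hn
    simp [PySem.List.pyRange_one_eq_nil le_rfl, pvChunk]
  | succ n ih =>
    intro cur j hj hn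
    have hsp : ((n + 1 : Nat) : Int) = (n : Int) + 1 := by push_cast; ring
    rw [hsp, PySem.List.pyRange_one_succ_right (by positivity), List.foldl_append]
    rw [ih cur j hj (by omega)]
    simp only [List.foldl_cons, List.foldl_nil]
    have hlen : (pvChunk lst j n).length = n := pvChunk_len lst j n
    have hset : PySem.List.pySetD (pvChunk lst j n ++ cur.drop n) ((n : Nat) : Int)
        (PySem.List.pyGetD lst (j + n) 0) =
        pvChunk lst j (n + 1) ++ cur.drop (n + 1) := by
      rw [PySem.List.pySetD_natCast, List.set_append_right _ _ (by omega), hlen, Nat.sub_self,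
        List.drop_eq_getElem_cons (show n < cur.length by omega), List.set_cons_zero,
        pvChunk_succ]
      simp
    rw [hset, add_assoc]

lemma zipA_fill_eq_chunk (lst : List Int) (l : List Int) (j : Int)
    (hj : 0 ≤ j) : zipA_fill lst l j = (pvChunk lst j l.length, j + l.length) := by
  have := fill_aux lst l.length l j hj (le_refl _)
  simpa [zipA_fill] using this

lemma chunk_eq_slice (lst : List Int) (j : Int) (n : Nat)
    (hj : 0 ≤ j) (hn : j + n ≤ lst.length) :
    pvChunk lst j n = PySem.List.slice lst (some j) (some (j + (n : Int))) := by
  rw [PySem.List.slice_toNat _ hj (by omega)]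
  have hjn : (j + (n : Int)).toNat - j.toNat = n := by omega
  rw [hjn]
  have hlenlst : j.toNat + n ≤ lst.length := by omega
  apply List.ext_getElem
  · rw [pvChunk_len]; simp; omega
  · intro k hk1 hk2
    have hk : k < n := by rw [pvChunk_len] at hk1; exact hk1
    unfold pvChunk
    rw [List.getElem_map, PySem.List.getElem_pyRange_one,
        List.getElem_take, List.getElem_drop]
    rw [PySem.List.pyGetD_eq_getElem _ _ (by omega) (by omega)]
    congr 1
    omega

def stepA (lst : List Int) (st : List (List Int) × Int) (l : List Int) : List (List Int) × Int :=
  let r := zipA_fill lst l st.2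
  (st.1 ++ [r.1], r.2)

def stepB (lst : List Int) (st : List (List Int) × Int) (l : List Int) : List (List Int) × Int :=
  (st.1 ++ [PySem.List.slice lst (some st.2) (some (st.2 + (l.length : Int)))],
   st.2 + (l.length : Int))

lemma outer_aux (lst : List Int) : ∀ (ll : List (List Int)) (acc : List (List Int)) (j : Int),
    0 ≤ j → j + ((ll.map (fun s => (s.length : Int))).sum) ≤ (lst.length : Int) →
    ll.foldl (stepA lst) (acc, j) = ll.foldl (stepB lst) (acc, j) := by
  intro ll
  induction ll with
  | nil => intro acc j _ _; rfl
  | cons l rest ih =>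
    intro acc j hj hb
    have hrest : 0 ≤ ((rest.map (fun s => (s.length : Int))).sum) := by
      apply List.sum_nonneg; intro x hx
      simp only [List.mem_map] at hx
      obtain ⟨s, _, rfl⟩ := hx
      positivity
    simp only [List.foldl_cons]
    have hA : stepA lst (acc, j) l = stepB lst (acc, j) l := by
      simp only [stepA, stepB, zipA_fill_eq_chunk lst l j hj]
      rw [chunk_eq_slice lst j l.length hj (by simp only [List.map_cons, List.sum_cons] at hb; omega)]
    rw [hA]
    have hb' : j + (l.length : Int) + ((rest.map (fun s => (s.length : Int))).sum) ≤ (lst.length : Int) := by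
      simp only [List.map_cons, List.sum_cons] at hb; omega
    exact ih (acc ++ [PySem.List.slice lst (some j) (some (j + (l.length : Int)))])
      (j + l.length) (by positivity) hb'

lemma foldB_all_empty (lst : List Int) : ∀ (ll : List (List Int)) (acc : List (List Int)) (j : Int),
    0 ≤ j → ((ll.map (fun s => (s.length : Int))).sum) = 0 →
    (ll.foldl (stepB lst) (acc, j)).1 = acc ++ ll := by
  intro ll
  induction ll with
  | nil => intro acc j _ _; simp
  | cons l rest ih =>
    intro acc j hj h0
    have hrest0 : 0 ≤ ((rest.map (fun s => (s.length : Int))).sum) := by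
      apply List.sum_nonneg; intro x hx
      simp only [List.mem_map] at hx
      obtain ⟨s, _, rfl⟩ := hx
      positivity
    have hl : l = [] := by
      apply List.eq_nil_of_length_eq_zero
      simp only [List.map_cons, List.sum_cons] at h0
      omega
    subst hl
    have hrest : ((rest.map (fun s => (s.length : Int))).sum) = 0 := by
      simp only [List.map_cons, List.sum_cons, List.length_nil, Nat.cast_zero] at h0
      omega
    simp only [List.foldl_cons, stepB, List.length_nil, Nat.cast_zero, add_zero]
    rw [PySem.List.slice_toNat _ hj hj]
    simp only [Nat.sub_self, List.take_zero]
    rw [ih (acc ++ [[]]) j hj hrest]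
    simp

theorem zip_nestedlst_lst_spec : Claim_equal_zip_nestedlst_lst := by
  intro ll lst _ hpre
  unfold Spec_zip_nestedlst_lst zip_nestedlst_lst zip_nestedlst_lst_alt
  by_cases h0 : ((ll.map (fun s => (s.length : Int))).sum) = 0
  · simp only [h0, if_true]
    show ll = (ll.foldl (stepB lst) ([], 0)).1
    rw [foldB_all_empty lst ll [] 0 le_rfl h0]
    simp
  · simp only [if_neg h0]
    have hbound : (0 : Int) + ((ll.map (fun s => (s.length : Int))).sum) ≤ (lst.length : Int) := by
      unfold Pre_zip_nestedlst_lst at hpre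
      have h := Int.ofNat_le.mpr hpre
      push_cast at h
      simp only [List.map_map, Function.comp_def] at h
      omega
    have := outer_aux lst ll [] 0 (le_refl 0) hbound
    show (ll.foldl (stepA lst) ([], 0)).1 = (ll.foldl (stepB lst) ([], 0)).1
    rw [this]
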